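-- pv_equiv track=rewrite | github.com/peterhan91/multiplex-preproc | scripts/panels.py | canonical_fluor
-- ===== SOURCE A (Python) =====
-- FLUOR_ALIASES: dict[str, set[str]] = {
--     "DAPI":    {"DAPI", "Hoechst"},
--     "Atto550": {"ATTO 550", "Atto550", "ATTO550"},
--     "AF488":   {"FITC", "AF488", "Alexa 488", "Alexa Fluor 488"},
--     "AF647":   {"Cy5", "AF647", "Alexa 647", "Alexa Fluor 647"},
-- }
--
-- def canonical_fluor(name: str | None) -> str | None:
--     """Map an OME-XML fluorophore label → canonical reporter name."""
--     if not name: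
--         return None
--     n = name.strip()
--     n_lower = n.lower()
--     for canon, aliases in FLUOR_ALIASES.items():
--         if n in aliases or n_lower in {a.lower() for a in aliases}:
--             return canon
--     return None
-- ===== SOURCE B (Python) =====
-- # Exact matching is redundant: every alias's exact hit and its lowered hit land in the
-- # same canon bucket, and lowered alias sets are disjoint across buckets, so one
-- # case-insensitive lookup suffices.
-- _CANON_BY_LOWER = {
--     "dapi": "DAPI", "hoechst": "DAPI",
--     "atto 550": "Atto550", "atto550": "Atto550",
--     "fitc": "AF488", "af488": "AF488",
--     "alexa 488": "AF488", "alexa fluor 488": "AF488",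
--     "cy5": "AF647", "af647": "AF647",
--     "alexa 647": "AF647", "alexa fluor 647": "AF647",
-- }
--
-- def canonical_fluor(name):
--     """Map an OME-XML fluorophore label -> canonical reporter name."""
--     if not name:
--         return None
--     return _CANON_BY_LOWER.get(name.strip().lower())
-- ===== Notes on version B (the rewrite author's own statement) =====
-- stated objective: simpler
-- what changed: Replaced A's per-call loop over canon buckets (exact-set test plus a lowered alias set rebuilt each iteration) with a single case-insensitive lookup in one flat lowered-alias->canon dict; the exact-match pass is dropped entirely because every exact hit is also a lowered hit in the same bucket and the lowered alias sets are disjoint across buckets.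
import Mathlib
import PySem

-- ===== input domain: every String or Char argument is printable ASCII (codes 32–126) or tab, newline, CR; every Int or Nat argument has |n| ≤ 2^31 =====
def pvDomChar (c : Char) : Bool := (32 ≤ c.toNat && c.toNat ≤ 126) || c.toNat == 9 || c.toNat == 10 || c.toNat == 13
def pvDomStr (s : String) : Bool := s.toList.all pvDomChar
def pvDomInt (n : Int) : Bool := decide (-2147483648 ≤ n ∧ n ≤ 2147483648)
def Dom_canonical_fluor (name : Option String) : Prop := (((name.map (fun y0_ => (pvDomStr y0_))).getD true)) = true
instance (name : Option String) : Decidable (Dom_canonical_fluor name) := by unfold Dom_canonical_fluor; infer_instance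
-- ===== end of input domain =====

-- B drops A's per-call loop over canon buckets with its exact-then-lowercase tests and does a
-- single case-insensitive lookup in one flat lowered-alias→canon dict (correct because every
-- exact hit is also a lowered hit in the same bucket and the lowered alias sets are disjoint).

-- ===== PORT A =====
-- the module constant FLUOR_ALIASES (dict canon → set of aliases, insertion order)
def pvFluorAliases : List (String × PySem.Set String) :=
  [("DAPI",    PySem.Set.ofList ["DAPI", "Hoechst"]),
   ("Atto550", PySem.Set.ofList ["ATTO 550", "Atto550", "ATTO550"]),
   ("AF488",   PySem.Set.ofList ["FITC", "AF488", "Alexa 488", "Alexa Fluor 488"]),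
   ("AF647",   PySem.Set.ofList ["Cy5", "AF647", "Alexa 647", "Alexa Fluor 647"])]

-- the 'for canon, aliases in FLUOR_ALIASES.items():' loop with its early return
def pvCanonLoop (n nlow : String) : List (String × PySem.Set String) → Option String
  | [] => none
  | (canon, aliases) :: rest =>
    if PySem.Set.contains aliases n
       || PySem.Set.contains (PySem.Set.ofList (aliases.map PySem.Str.lower)) nlow
    then some canon
    else pvCanonLoop n nlow rest

def canonical_fluor (name : Option String) : Option String :=
  match name with
  | none => none
  | some s =>
    if s = "" then none  -- 'if not name'
    else
      let n := PySem.Str.strip s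
      let nlow := PySem.Str.lower n
      pvCanonLoop n nlow pvFluorAliases

-- ===== PORT B =====
-- Source B's literal module dict _CANON_BY_LOWER
def pvCanonByLower : PySem.Dict String String :=
  PySem.Dict.ofList
    [("dapi", "DAPI"), ("hoechst", "DAPI"),
     ("atto 550", "Atto550"), ("atto550", "Atto550"),
     ("fitc", "AF488"), ("af488", "AF488"),
     ("alexa 488", "AF488"), ("alexa fluor 488", "AF488"),
     ("cy5", "AF647"), ("af647", "AF647"),
     ("alexa 647", "AF647"), ("alexa fluor 647", "AF647")]

def canonical_fluor_alt (name : Option String) : Option String :=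
  match name with
  | none => none
  | some s =>
    if s = "" then none  -- 'if not name'
    else PySem.Dict.get? pvCanonByLower (PySem.Str.lower (PySem.Str.strip s))

-- ===== PRECONDITION & SPEC =====
def Spec_canonical_fluor (name : Option String) (out : Option String) : Prop := out = canonical_fluor_alt name
instance (name : Option String) (out : Option String) : Decidable (Spec_canonical_fluor name out) := by unfold Spec_canonical_fluor; infer_instance

-- ===== CLAIM (what is proved, stated in full; the proofs are below) =====
def Claim_equal_canonical_fluor : Prop := ∀ (name : Option String), Dom_canonical_fluor name → Spec_canonical_fluor name (canonical_fluor name)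

-- ===== LEMMAS AND PROOFS =====

-- the 17 exact alias strings of A's table
def pvExact : List String :=
  ["DAPI", "Hoechst", "ATTO 550", "Atto550", "ATTO550",
   "FITC", "AF488", "Alexa 488", "Alexa Fluor 488",
   "Cy5", "AF647", "Alexa 647", "Alexa Fluor 647"]

-- the 12 lowered keys of B's dict
def pvLowKeys : List String :=
  ["dapi", "hoechst", "atto 550", "atto550", "fitc", "af488",
   "alexa 488", "alexa fluor 488", "cy5", "af647", "alexa 647", "alexa fluor 647"]

-- A's loop after the exact-alias tests are known to fail, as a chain on the lowered name
def pvLowChain (m : String) : Option String :=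
  if m = "dapi" ∨ m = "hoechst" then some "DAPI"
  else if m = "atto 550" ∨ m = "atto550" then some "Atto550"
  else if m = "fitc" ∨ m = "af488" ∨ m = "alexa 488" ∨ m = "alexa fluor 488" then some "AF488"
  else if m = "cy5" ∨ m = "af647" ∨ m = "alexa 647" ∨ m = "alexa fluor 647" then some "AF647"
  else none

theorem char_le_toNat (a b : Char) : a ≤ b ↔ a.toNat ≤ b.toNat := by
  rw [Char.le_def, UInt32.le_iff_toNat_le]; rfl

theorem lowerChar_idem (c : Char) :
    PySem.Chars.lowerChar (PySem.Chars.lowerChar c) = PySem.Chars.lowerChar c := by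
  simp only [PySem.Chars.lowerChar, PySem.Chars.isupper]
  split_ifs with h1 h2
  · exfalso
    simp only [Bool.and_eq_true, decide_eq_true_eq, char_le_toNat] at h1 h2
    have hb : 65 ≤ c.toNat ∧ c.toNat ≤ 90 := by
      constructor
      · calc (65 : Nat) = ('A' : Char).toNat := by decide
          _ ≤ _ := h1.1
      · calc c.toNat ≤ ('Z' : Char).toNat := h1.2
          _ = 90 := by decide
    have hv : (c.toNat + 32).isValidChar := Or.inl (by omega)
    have hn : (Char.ofNat (c.toNat + 32)).toNat = c.toNat + 32 := by simp [Char.ofNat, hv]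
    have h2a := h2.2
    rw [hn] at h2a
    have hz : ('Z' : Char).toNat = 90 := by decide
    omega
  · rfl
  · rfl

theorem lower_idem (s : String) : PySem.Str.lower (PySem.Str.lower s) = PySem.Str.lower s := by
  apply String.ext
  simp [PySem.Str.toList_lower, PySem.Chars.lower, Function.comp_def, lowerChar_idem]

-- B's lookup on a lowercase-stable string is exactly A's lowered chain
theorem lookup_lower (m : String) (hm : PySem.Str.lower m = m) :
    PySem.Dict.get? pvCanonByLower m = pvLowChain m := by
  by_cases hk : m ∈ pvLowKeys
  · simp only [pvLowKeys, List.mem_cons, List.not_mem_nil, or_false] at hk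
    rcases hk with h | h | h | h | h | h | h | h | h | h | h | h <;> subst h <;> decide
  · have h0 : PySem.Dict.get? pvCanonByLower m = none := by
      rw [PySem.Dict.get?_eq_none_iff_not_mem_keys]
      rw [show PySem.Dict.keys pvCanonByLower = pvLowKeys from by decide]
      exact hk
    simp only [pvLowKeys, List.mem_cons, List.not_mem_nil, or_false, not_or] at hk
    rw [h0]
    simp only [pvLowChain]
    split_ifs <;> first | rfl | tauto

-- A's loop, once the stripped name matches no exact alias, is the lowered chain
theorem loop_reduce (n m : String) (hne : n ∉ pvExact) :
    pvCanonLoop n m pvFluorAliases = pvLowChain m := by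
  simp only [pvExact, List.mem_cons, List.not_mem_nil, or_false, not_or] at hne
  obtain ⟨e1, e2, e3, e4, e5, e6, e7, e8, e9, e10, e11, e12, e13⟩ := hne
  simp only [pvCanonLoop, pvFluorAliases, pvLowChain,
    show ∀ l : List String, ∀ x, PySem.Set.contains (PySem.Set.ofList l) x = l.contains x from
      fun l x => by
        simp only [PySem.Set.contains, List.contains_eq_mem, decide_eq_decide]
        exact PySem.Set.mem_ofList l x]
  rw [show List.map PySem.Str.lower (PySem.Set.ofList ["DAPI", "Hoechst"]) = ["dapi", "hoechst"] from by decide,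
      show List.map PySem.Str.lower (PySem.Set.ofList ["ATTO 550", "Atto550", "ATTO550"]) = ["atto 550", "atto550", "atto550"] from by decide,
      show List.map PySem.Str.lower (PySem.Set.ofList ["FITC", "AF488", "Alexa 488", "Alexa Fluor 488"]) = ["fitc", "af488", "alexa 488", "alexa fluor 488"] from by decide,
      show List.map PySem.Str.lower (PySem.Set.ofList ["Cy5", "AF647", "Alexa 647", "Alexa Fluor 647"]) = ["cy5", "af647", "alexa 647", "alexa fluor 647"] from by decide]
  simp only [List.contains_eq_mem, List.mem_cons, List.not_mem_nil, or_false,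
    Bool.or_eq_true, decide_eq_true_eq, e1, e2, e3, e4, e5, e6, e7, e8, e9, e10, e11, e12, e13,
    false_or]
  split_ifs <;> first | rfl | tauto

-- the core equality on the stripped name
theorem core (n : String) :
    pvCanonLoop n (PySem.Str.lower n) pvFluorAliases =
      PySem.Dict.get? pvCanonByLower (PySem.Str.lower n) := by
  by_cases hk : n ∈ pvExact
  · simp only [pvExact, List.mem_cons, List.not_mem_nil, or_false] at hk
    rcases hk with h | h | h | h | h | h | h | h | h | h | h | h | h <;> subst h <;> decide
  · rw [loop_reduce n _ hk, lookup_lower (PySem.Str.lower n) (lower_idem n)]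

-- ===== VERDICT (by name: the statement is the Claim_ definition above) =====
theorem canonical_fluor_spec : Claim_equal_canonical_fluor := by
  intro name _
  unfold Spec_canonical_fluor canonical_fluor canonical_fluor_alt
  match name with
  | none => rfl
  | some s =>
    by_cases hs : s = ""
    · simp [hs]
    · simp only [if_neg hs]
      exact core (PySem.Str.strip s)
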